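-- pv_equiv track=rewrite | github.com/tymaanduh/aio | scripts/polyglot/equivalents/python/_native/generate_neutral_core_assets.py | to_const_key
-- ===== SOURCE A (Python) =====
-- def to_const_key(function_id: str) -> str:
--     normalized = []
--     last_was_underscore = False
--     for char in str(function_id or ""):
--         if char.isalnum():
--             normalized.append(char.upper())
--             last_was_underscore = False
--             continue
--         if not last_was_underscore:
--             normalized.append("_")
--             last_was_underscore = True
--     while normalized and normalized[0] == "_":
--         normalized.pop(0)
--     while normalized and normalized[-1] == "_":
--         normalized.pop()
--     return "".join(normalized)
-- ===== SOURCE B (Python) =====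
-- def to_const_key(function_id: str) -> str:
--     s = str(function_id or "")
--     spaced = "".join(c.upper() if c.isalnum() else " " for c in s)
--     return "_".join(spaced.split())
-- ===== Notes on version B (the rewrite author's own statement) =====
-- stated objective: simpler
-- what changed: Replaces the explicit per-char accumulator with its last_was_underscore flag and the two while-pop trimming loops by mapping each char to its uppercase form or a space and letting a no-argument split collapse runs and strip the ends before joining the words with underscores.
import Mathlib
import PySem

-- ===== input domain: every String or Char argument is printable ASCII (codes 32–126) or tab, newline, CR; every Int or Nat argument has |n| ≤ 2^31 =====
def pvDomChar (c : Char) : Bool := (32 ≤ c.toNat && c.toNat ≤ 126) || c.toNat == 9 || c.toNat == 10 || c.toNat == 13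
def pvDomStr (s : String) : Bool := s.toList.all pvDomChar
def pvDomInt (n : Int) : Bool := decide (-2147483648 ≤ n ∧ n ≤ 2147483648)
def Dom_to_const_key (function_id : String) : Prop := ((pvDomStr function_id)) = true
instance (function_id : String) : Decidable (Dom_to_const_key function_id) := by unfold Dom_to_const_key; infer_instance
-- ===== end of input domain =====

-- B is simpler: it maps each char to its uppercase form or a space and lets a no-argument split
-- collapse runs and strip the ends before joining the words with underscores, replacing A's
-- flag-carrying loop and two while-pop trims.

-- ===== PORT A =====
-- the for-loop over the chars, carrying (last_was_underscore); returns the appended chars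
def pvLoopA : List Char → Bool → List Char
  | [], _ => []
  | c :: rest, lastU =>
    if PySem.Chars.isalnum c then PySem.Chars.upperChar c :: pvLoopA rest false
    else if lastU then pvLoopA rest true
    else '_' :: pvLoopA rest true

-- while normalized and normalized[0] == "_": normalized.pop(0)
def pvTrimLead : List Char → List Char
  | [] => []
  | c :: rest => if c == '_' then pvTrimLead rest else c :: rest

-- while normalized and normalized[-1] == "_": normalized.pop()
def pvTrimTrail (l : List Char) : List Char :=
  if l.getLast? == some '_' then pvTrimTrail l.dropLast else l
termination_by l.length
decreasing_by
  cases l with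
  | nil => simp at *
  | cons c rest => simp

def to_const_key (function_id : String) : String :=
  String.ofList (pvTrimTrail (pvTrimLead (pvLoopA function_id.toList false)))

-- ===== PORT B =====
-- c.upper() if c.isalnum() else " " per char
def pvG (c : Char) : Char :=
  if PySem.Chars.isalnum c then PySem.Chars.upperChar c else ' '

def to_const_key_alt (function_id : String) : String :=
  String.ofList (PySem.Chars.join ['_'] (PySem.Chars.split₀ (function_id.toList.map pvG)))

-- ===== PRECONDITION & SPEC =====
def Spec_to_const_key (function_id : String) (out : String) : Prop := out = to_const_key_alt function_id
instance (function_id : String) (out : String) : Decidable (Spec_to_const_key function_id out) := by unfold Spec_to_const_key; infer_instance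

-- ===== CLAIM (what is proved, stated in full; the proofs are below) =====
def Claim_equal_to_const_key : Prop := ∀ (function_id : String), Dom_to_const_key function_id → Spec_to_const_key function_id (to_const_key function_id)

-- ===== LEMMAS AND PROOFS =====

-- an alnum char maps under upperChar to an uppercase letter or digit: never '_', never whitespace
theorem pv_upper_ne (c : Char) (h : PySem.Chars.isalnum c = true) :
    PySem.Chars.upperChar c ≠ '_' ∧ PySem.Chars.isspace (PySem.Chars.upperChar c) = false := by
  simp [PySem.Chars.isalnum, PySem.Chars.isalpha, PySem.Chars.isdigit, PySem.Chars.isupper,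
    PySem.Chars.islower, Char.le_def, UInt32.le_iff_toNat_le] at h
  have hval : ∀ (d : Char), (48 ≤ d.toNat ∧ d.toNat ≤ 57) ∨ (65 ≤ d.toNat ∧ d.toNat ≤ 90) →
      d ≠ '_' ∧ PySem.Chars.isspace d = false := by
    intro d hd
    have h95 : d.toNat ≠ 95 := by omega
    refine ⟨fun he => h95 (by rw [he]; rfl), ?_⟩
    unfold PySem.Chars.isspace
    simp only [Bool.or_eq_false_iff, Bool.and_eq_false_iff, decide_eq_false_iff_not]
    omega
  unfold PySem.Chars.upperChar
  split
  · next hl =>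
    simp [PySem.Chars.islower, Char.le_def, UInt32.le_iff_toNat_le] at hl
    have hl1 : 97 ≤ c.toNat := hl.1
    have hl2 : c.toNat ≤ 122 := hl.2
    have hv : (c.toNat - 32).isValidChar := Or.inl (by omega)
    apply hval
    right
    rw [Char.toNat_ofNat, if_pos hv]
    omega
  · next hl =>
    simp [PySem.Chars.islower, Char.le_def, UInt32.le_iff_toNat_le, not_and_or, not_le] at hl
    apply hval
    rcases h with (h | h) | h
    · right; exact ⟨h.1, h.2⟩
    · exfalso; omega
    · left; exact ⟨h.1, h.2⟩

theorem pv_space_isspace : PySem.Chars.isspace ' ' = true := by decide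

-- pvTrimTrail is "strip trailing underscores"
theorem pvTrimTrail_eq (l : List Char) :
    pvTrimTrail l = (l.reverse.dropWhile (· == '_')).reverse := by
  induction l using List.reverseRecOn with
  | nil => simp [pvTrimTrail]
  | append_singleton xs x ih =>
    rw [pvTrimTrail]
    by_cases hx : x = '_'
    · subst hx
      simp [List.getLast?_concat, List.dropWhile, ih]
    · simp [List.getLast?_concat, hx, List.dropWhile]

-- the loop with flag = true skips the non-alnum prefix entirely
theorem pvLoopA_true (cs : List Char) :
    pvLoopA cs true = pvLoopA (cs.dropWhile (fun c => !PySem.Chars.isalnum c)) false := by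
  induction cs with
  | nil => rfl
  | cons c rest ih =>
    by_cases hc : PySem.Chars.isalnum c = true
    · simp [pvLoopA, hc, List.dropWhile]
    · simp only [Bool.not_eq_true] at hc
      simp [pvLoopA, hc, List.dropWhile, ih]

-- stripping leading underscores of the loop output = running the loop after the non-alnum prefix
theorem pvTrimLead_loopA (cs : List Char) (b : Bool) :
    pvTrimLead (pvLoopA cs b) = pvLoopA (cs.dropWhile (fun c => !PySem.Chars.isalnum c)) false := by
  induction cs generalizing b with
  | nil => cases b <;> rfl
  | cons c rest ih =>
    by_cases hc : PySem.Chars.isalnum c = true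
    · have hne := (pv_upper_ne c hc).1
      simp [pvLoopA, hc, List.dropWhile, pvTrimLead, hne]
    · simp only [Bool.not_eq_true] at hc
      cases b with
      | true => simp [pvLoopA, hc, List.dropWhile, ih]
      | false => simp [pvLoopA, hc, List.dropWhile, pvTrimLead, ih]

-- split₀.go: the accumulator is a prefix of the result
theorem pv_go_acc (cs : List Char) (cur : List Char) (acc : List (List Char)) :
    PySem.Chars.split₀.go cs cur acc = acc.reverse ++ PySem.Chars.split₀.go cs cur [] := by
  induction cs generalizing cur acc with
  | nil =>
    rw [PySem.Chars.split₀.go.eq_def, PySem.Chars.split₀.go.eq_def]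
    cases h : cur.isEmpty <;> simp [h]
  | cons c rest ih =>
    rw [PySem.Chars.split₀.go.eq_def]
    conv_rhs => rw [PySem.Chars.split₀.go.eq_def]
    dsimp only
    by_cases hs : PySem.Chars.isspace c = true
    · rw [if_pos hs, if_pos hs]
      by_cases h : cur.isEmpty = true
      · rw [if_pos h, if_pos h]
        exact ih [] acc
      · rw [if_neg h, if_neg h]
        rw [ih [] (cur.reverse :: acc), ih [] [cur.reverse]]
        simp
    · rw [if_neg hs, if_neg hs]
      exact ih (c :: cur) acc

-- split₀.go over a block of non-space chars just accumulates them
theorem pv_go_word (w : List Char) (cs : List Char) (cur : List Char) (acc : List (List Char))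
    (hw : ∀ c ∈ w, PySem.Chars.isspace c = false) :
    PySem.Chars.split₀.go (w ++ cs) cur acc = PySem.Chars.split₀.go cs (w.reverse ++ cur) acc := by
  induction w generalizing cur with
  | nil => simp
  | cons c rest ih =>
    have hc : PySem.Chars.isspace c = false := hw c (by simp)
    rw [List.cons_append, PySem.Chars.split₀.go.eq_def]
    dsimp only
    have hcf : ¬ (PySem.Chars.isspace c = true) := by simp [hc]
    rw [if_neg hcf]
    rw [ih (c :: cur) (fun d hd => hw d (by simp [hd]))]
    simp

-- a leading space in split₀ is dropped
theorem pv_split₀_space (t : List Char) :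
    PySem.Chars.split₀ (' ' :: t) = PySem.Chars.split₀ t := by
  unfold PySem.Chars.split₀
  rw [PySem.Chars.split₀.go.eq_def]
  simp [pv_space_isspace]

-- dropping the non-alnum prefix does not change split₀ of the pvG image
theorem pv_split₀_dropPrefix (cs : List Char) :
    PySem.Chars.split₀ ((cs.dropWhile (fun c => !PySem.Chars.isalnum c)).map pvG) =
    PySem.Chars.split₀ (cs.map pvG) := by
  induction cs with
  | nil => rfl
  | cons c rest ih =>
    by_cases hc : PySem.Chars.isalnum c = true
    · simp [List.dropWhile, hc]
    · simp only [Bool.not_eq_true] at hc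
      have : pvG c = ' ' := by simp [pvG, hc]
      simp [List.dropWhile, hc, this, pv_split₀_space, ih]

-- dropWhile (== '_') is the identity on underscore-free lists
theorem pv_dropWhile_noU (X : List Char) (h : ∀ c ∈ X, c ≠ '_') :
    X.dropWhile (· == '_') = X := by
  cases X with
  | nil => rfl
  | cons c rest =>
    rw [List.dropWhile_cons_of_neg]
    simpa using h c (by simp)

-- split₀ of a single nonempty non-space word
theorem pv_split₀_word (w : List Char) (hw : ∀ c ∈ w, PySem.Chars.isspace c = false)
    (hne : w ≠ []) : PySem.Chars.split₀ w = [w] := by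
  unfold PySem.Chars.split₀
  have h1 := pv_go_word w [] [] [] hw
  simp only [List.append_nil] at h1
  rw [h1, PySem.Chars.split₀.go.eq_def]
  dsimp only
  have h2 : (w.reverse ++ []).isEmpty = false := by simp [hne]
  simp [h2, hne]

-- split₀ of a nonempty non-space word, a space, then a tail
theorem pv_split₀_word_sep (w t : List Char) (hw : ∀ c ∈ w, PySem.Chars.isspace c = false)
    (hne : w ≠ []) : PySem.Chars.split₀ (w ++ ' ' :: t) = w :: PySem.Chars.split₀ t := by
  unfold PySem.Chars.split₀
  rw [pv_go_word w (' ' :: t) [] [] hw, PySem.Chars.split₀.go.eq_def]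
  dsimp only
  have h2 : ¬ ((w.reverse ++ []).isEmpty = true) := by simp [hne]
  rw [if_pos pv_space_isspace, if_neg h2, pv_go_acc]
  simp

-- the loop maps an all-alnum block to its uppercased image
theorem pvLoopA_word (w rest : List Char) (hw : ∀ c ∈ w, PySem.Chars.isalnum c = true) :
    pvLoopA (w ++ rest) false = w.map PySem.Chars.upperChar ++ pvLoopA rest false := by
  induction w with
  | nil => simp
  | cons c t ih =>
    have hc := hw c (by simp)
    simp [pvLoopA, hc, ih (fun d hd => hw d (by simp [hd]))]

theorem pv_head_dropWhile {p : Char → Bool} {l : List Char} {d : Char} {t : List Char}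
    (h : l.dropWhile p = d :: t) : p d = false := by
  induction l with
  | nil => simp [List.dropWhile] at h
  | cons c rest ih =>
    rw [List.dropWhile] at h
    by_cases hc : p c = true
    · simp only [hc] at h; exact ih h
    · simp only [Bool.not_eq_true] at hc
      simp only [hc] at h
      injection h with h1 _
      subst h1
      exact hc

-- MAIN LEMMA: for inputs whose first char (if any) is alnum, the trimmed loop output is
-- join "_" of split₀ of the pvG image; moreover that split₀ is nonempty when the input is
theorem pv_main : ∀ (n : Nat) (cs : List Char), cs.length ≤ n →
    (∀ d t, cs = d :: t → PySem.Chars.isalnum d = true) →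
    pvTrimTrail (pvLoopA cs false) = PySem.Chars.join ['_'] (PySem.Chars.split₀ (cs.map pvG)) ∧
    (cs ≠ [] → PySem.Chars.split₀ (cs.map pvG) ≠ []) := by
  intro n
  induction n with
  | zero =>
    intro cs hlen _
    have : cs = [] := List.eq_nil_of_length_eq_zero (Nat.le_zero.mp hlen)
    subst this
    exact ⟨by rw [pvTrimTrail_eq]; decide, by simp⟩
  | succ n ih =>
    intro cs hlen hhead
    cases hcs : cs with
    | nil => exact ⟨by rw [pvTrimTrail_eq]; decide, by simp⟩
    | cons d t =>
      subst hcs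
      have hd : PySem.Chars.isalnum d = true := hhead d t rfl
      -- decompose into the alnum word w and the remainder r
      set w := (d :: t).takeWhile PySem.Chars.isalnum with hw_def
      set r := (d :: t).dropWhile PySem.Chars.isalnum with hr_def
      have hsplit : w ++ r = d :: t := List.takeWhile_append_dropWhile
      have hw_alnum : ∀ c ∈ w, PySem.Chars.isalnum c = true := fun c hc => List.mem_takeWhile_imp hc
      have hw_ne : w ≠ [] := by
        rw [hw_def, List.takeWhile]
        simp [hd]
      have hmapw : w.map pvG = w.map PySem.Chars.upperChar := by
        apply List.map_congr_left
        intro c hc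
        simp [pvG, hw_alnum c hc]
      have hw_nospace : ∀ c ∈ w.map PySem.Chars.upperChar, PySem.Chars.isspace c = false := by
        intro c hc
        obtain ⟨a, ha, rfl⟩ := List.mem_map.mp hc
        exact (pv_upper_ne a (hw_alnum a ha)).2
      have hw_noU : ∀ c ∈ w.map PySem.Chars.upperChar, c ≠ '_' := by
        intro c hc
        obtain ⟨a, ha, rfl⟩ := List.mem_map.mp hc
        exact (pv_upper_ne a (hw_alnum a ha)).1
      have hloop : pvLoopA (d :: t) false = w.map PySem.Chars.upperChar ++ pvLoopA r false := by
        rw [← hsplit]; exact pvLoopA_word w r hw_alnum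
      have hmap : (d :: t).map pvG = w.map PySem.Chars.upperChar ++ r.map pvG := by
        rw [← hsplit, List.map_append, hmapw]
      -- trimTrail leaves an all-non-underscore list alone
      have htrim_word : pvTrimTrail (w.map PySem.Chars.upperChar) = w.map PySem.Chars.upperChar := by
        rw [pvTrimTrail_eq,
          pv_dropWhile_noU _ (fun c hc => hw_noU c (List.mem_reverse.mp hc)),
          List.reverse_reverse]
      cases hr : r with
      | nil =>
        -- no separator at all: one word
        have hln : pvLoopA [] false = [] := rfl
        rw [hr, hln, List.append_nil] at hloop
        rw [hr, List.map_nil, List.append_nil] at hmap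
        have hmapne : w.map PySem.Chars.upperChar ≠ [] := by simp [hw_ne]
        have hs₀ : PySem.Chars.split₀ (w.map PySem.Chars.upperChar) = [w.map PySem.Chars.upperChar] :=
          pv_split₀_word _ hw_nospace hmapne
        refine ⟨?_, fun _ => ?_⟩
        · rw [hloop, hmap, htrim_word, hs₀, PySem.Chars.join_singleton]
        · rw [hmap, hs₀]; simp
      | cons e r' =>
        have he : PySem.Chars.isalnum e = false := by
          exact pv_head_dropWhile (l := d :: t) (by rw [← hr_def]; exact hr)
        have hge : pvG e = ' ' := by simp [pvG, he]
        -- r'' = the remainder after the non-alnum run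
        set r'' := r'.dropWhile (fun c => !PySem.Chars.isalnum c) with hr''_def
        have hlen'' : r''.length ≤ n := by
          have h1 : r''.length ≤ r'.length := List.length_dropWhile_le _ _
          have h2 : r.length ≤ (d :: t).length := by
            rw [hr_def]; exact List.length_dropWhile_le _ _
          rw [hr] at h2
          simp only [List.length_cons] at h2 hlen
          omega
        have hh'' : ∀ f u, r'' = f :: u → PySem.Chars.isalnum f = true := by
          intro f u hfu
          have := pv_head_dropWhile (l := r') (by rw [← hr''_def]; exact hfu)
          simpa using this
        obtain ⟨IH1, IH2⟩ := ih r'' hlen'' hh''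
        have hloopr : pvLoopA r false = '_' :: pvLoopA r'' false := by
          rw [hr]
          simp only [pvLoopA, he, Bool.false_eq_true, if_false, pvLoopA_true]
          rw [← hr''_def]
        -- B side: split₀ of the image is the word followed by split₀ of the tail's image
        have hmapne : w.map PySem.Chars.upperChar ≠ [] := by simp [hw_ne]
        have hsplitB : PySem.Chars.split₀ ((d :: t).map pvG) =
            w.map PySem.Chars.upperChar :: PySem.Chars.split₀ (r''.map pvG) := by
          rw [hmap, hr, List.map_cons, hge,
            pv_split₀_word_sep _ _ hw_nospace hmapne, ← pv_split₀_dropPrefix r', ← hr''_def]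
        cases hr''c : r'' with
        | nil =>
          -- trailing separator run only: the '_' is trimmed away
          refine ⟨?_, fun _ => by rw [hsplitB]; simp⟩
          rw [hloop, hloopr, hr''c, hsplitB, hr''c]
          simp only [pvLoopA, List.map_nil]
          have : PySem.Chars.split₀ ([] : List Char) = [] := rfl
          rw [this, PySem.Chars.join_singleton, pvTrimTrail_eq]
          have hrev : (List.map PySem.Chars.upperChar w ++ ['_']).reverse =
              '_' :: (List.map PySem.Chars.upperChar w).reverse := by simp
          rw [hrev, List.dropWhile_cons_of_pos (by simp),
            pv_dropWhile_noU _ (fun c hc => hw_noU c (List.mem_reverse.mp hc)),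
            List.reverse_reverse]
        | cons f u =>
          have hr''ne : r'' ≠ [] := by rw [hr''c]; simp
          have hf : PySem.Chars.isalnum f = true := hh'' f u hr''c
          -- the loop output on r'' is nonempty and starts with a non-underscore char
          have hX : pvLoopA r'' false = PySem.Chars.upperChar f :: pvLoopA u false := by
            rw [hr''c]; simp [pvLoopA, hf]
          have hXmem : PySem.Chars.upperChar f ∈ pvLoopA r'' false := by rw [hX]; simp
          refine ⟨?_, fun _ => by rw [hsplitB]; simp⟩
          rw [hloop, hloopr, hsplitB]
          -- A side: trimTrail (word ++ '_' :: X) = word ++ '_' :: trimTrail X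
          have hdropX : (pvLoopA r'' false).reverse.dropWhile (· == '_') ≠ [] := by
            intro hnil
            rw [List.dropWhile_eq_nil_iff] at hnil
            have := hnil (PySem.Chars.upperChar f) (List.mem_reverse.mpr hXmem)
            exact (pv_upper_ne f hf).1 (by simpa using this)
          rw [pvTrimTrail_eq, List.reverse_append, List.reverse_cons, List.append_assoc,
            List.dropWhile_append]
          simp only [List.isEmpty_iff, hdropX, if_false]
          rw [List.reverse_append]
          have hJ : ((pvLoopA r'' false).reverse.dropWhile (· == '_')).reverse =
              pvTrimTrail (pvLoopA r'' false) := (pvTrimTrail_eq _).symm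
          rw [hJ, IH1]
          -- B side: join over a two-or-more list
          have hS : PySem.Chars.split₀ (r''.map pvG) ≠ [] := IH2 hr''ne
          obtain ⟨s, S', hSS⟩ := List.exists_cons_of_ne_nil hS
          rw [hSS, PySem.Chars.join_cons_cons, ← hSS]
          simp

-- ===== VERDICT (by name: the statement is the Claim_ definition above) =====
theorem to_const_key_spec : Claim_equal_to_const_key := by
  intro s _
  unfold Spec_to_const_key to_const_key to_const_key_alt
  rw [pvTrimLead_loopA]
  set cs0 := s.toList.dropWhile (fun c => !PySem.Chars.isalnum c) with hcs0
  have hh : ∀ d t, cs0 = d :: t → PySem.Chars.isalnum d = true := by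
    intro d t hdt
    have := pv_head_dropWhile (l := s.toList) (by rw [← hcs0]; exact hdt)
    simpa using this
  have := (pv_main cs0.length cs0 le_rfl hh).1
  rw [this, hcs0, pv_split₀_dropPrefix]
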